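-- pv_equiv track=rewrite | github.com/naivenlp/rapidnlp-datasets | smile_datasets/mlm/masking_strategy.py | _truncate_sequence
-- ===== SOURCE A (Python) =====
-- def _truncate_sequence(tokens, max_tokens=512, **kwargs):
--     while len(tokens) > max_tokens:
--         if len(tokens) > max_tokens:
--             tokens.pop(0)
--             # truncate whole world
--             while tokens and tokens[0].startswith("##"):
--                 tokens.pop(0)
--         if len(tokens) > max_tokens:
--             while tokens and tokens[-1].startswith("##"):
--                 tokens.pop()
--             if tokens:
--                 tokens.pop()
--     return tokens
-- ===== SOURCE B (Python) =====
-- def _truncate_sequence(tokens, max_tokens=512, **kwargs):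
--     lo, hi = 0, len(tokens)
--     while hi - lo > max_tokens and lo < hi:
--         lo += 1
--         while lo < hi and tokens[lo].startswith("##"):
--             lo += 1
--         if hi - lo > max_tokens:
--             while lo < hi and tokens[hi - 1].startswith("##"):
--                 hi -= 1
--             if lo < hi:
--                 hi -= 1
--     tokens[:] = tokens[lo:hi]
--     return tokens
-- ===== Notes on version B (the rewrite author's own statement) =====
-- stated objective: faster
-- what changed: B replaces A's repeated tokens.pop(0) list-shifting loop by a two-index scan (lo/hi cut positions computed in place, then one slice), removing the O(n) cost of each front pop.
import Mathlib
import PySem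

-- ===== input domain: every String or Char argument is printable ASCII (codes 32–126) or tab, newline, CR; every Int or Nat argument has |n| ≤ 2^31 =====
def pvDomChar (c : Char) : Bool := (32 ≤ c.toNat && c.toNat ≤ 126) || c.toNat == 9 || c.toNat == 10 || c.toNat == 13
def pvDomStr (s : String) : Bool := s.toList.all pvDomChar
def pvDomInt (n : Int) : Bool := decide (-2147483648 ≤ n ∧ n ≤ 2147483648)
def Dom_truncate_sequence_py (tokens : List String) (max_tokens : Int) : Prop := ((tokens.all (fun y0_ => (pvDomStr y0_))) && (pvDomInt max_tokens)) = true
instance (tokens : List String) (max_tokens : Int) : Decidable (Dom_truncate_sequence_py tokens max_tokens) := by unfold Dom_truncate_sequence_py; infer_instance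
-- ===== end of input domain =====

-- B computes the front/back cut indices with a two-index scan and slices once, instead of A's
-- repeated pop(0) list shifting (objective: faster). Both Pythons truncate `tokens` in place
-- and return it; the proved equivalence is about the returned value.


-- ===== PORT A =====
-- while tokens and tokens[0].startswith("##"): tokens.pop(0)
def popHashFront : List String → List String
  | [] => []
  | t :: ts => if PySem.Str.startswith t "##" then popHashFront ts else t :: ts

-- while tokens and tokens[-1].startswith("##"): tokens.pop()   (tokens[-1] = pyGet? ts (-1));
-- fuel = ts.length bounds the pops, so the recursion is structural
def popHashBackGo : Nat → List String → List String
  | 0, ts => ts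
  | fuel + 1, ts =>
    if ts ≠ [] ∧ PySem.Str.startswith ((PySem.List.pyGet? ts (-1)).getD "") "##" then
      popHashBackGo fuel ts.dropLast
    else ts

def popHashBack (ts : List String) : List String := popHashBackGo ts.length ts

-- the outer `while len(tokens) > max_tokens` loop of A (mutating `tokens` = ts);
-- each iteration removes at least one element, so fuel = initial length suffices
def loopAGo : Nat → List String → Int → List String
  | 0, ts, _ => ts
  | fuel + 1, ts, m =>
    if (ts.length : Int) > m then
      match ts with
      | [] => []   -- Python raises IndexError (pop from empty) here; excluded by Pre_
      | _ :: rest =>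
        let ts1 := popHashFront rest
        let ts2 :=
          if (ts1.length : Int) > m then
            let tb := popHashBack ts1
            if tb.isEmpty then tb else tb.dropLast
          else ts1
        loopAGo fuel ts2 m
    else ts

def truncate_sequence_py (tokens : List String) (max_tokens : Int) : List String :=
  loopAGo tokens.length tokens max_tokens

-- ===== PORT B =====
-- while lo < hi and tokens[lo].startswith("##"): lo += 1   (tokens[lo] always in range, so getD "" is exact;
-- fuel = hi - lo bounds the steps)
def frontSkipGo : Nat → List String → Int → Int → Int
  | 0, _, lo, _ => lo
  | fuel + 1, tokens, lo, hi =>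
    if lo < hi ∧ PySem.Str.startswith ((PySem.List.pyGet? tokens lo).getD "") "##" then
      frontSkipGo fuel tokens (lo + 1) hi
    else lo

def frontSkip (tokens : List String) (lo hi : Int) : Int :=
  frontSkipGo (hi - lo).toNat tokens lo hi

-- while lo < hi and tokens[hi - 1].startswith("##"): hi -= 1
def backSkipGo : Nat → List String → Int → Int → Int
  | 0, _, _, hi => hi
  | fuel + 1, tokens, lo, hi =>
    if lo < hi ∧ PySem.Str.startswith ((PySem.List.pyGet? tokens (hi - 1)).getD "") "##" then
      backSkipGo fuel tokens lo (hi - 1)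
    else hi

def backSkip (tokens : List String) (lo hi : Int) : Int :=
  backSkipGo (hi - lo).toNat tokens lo hi

-- the `while hi - lo > max_tokens and lo < hi` loop of B; returns the cut indices.
-- lo strictly increases and hi never increases, so fuel = hi - lo suffices
def loopBGo : Nat → List String → Int → Int → Int → Int × Int
  | 0, _, _, lo, hi => (lo, hi)
  | fuel + 1, tokens, m, lo, hi =>
    if hi - lo > m ∧ lo < hi then
      let lo1 := frontSkip tokens (lo + 1) hi
      if hi - lo1 > m then
        let hi1 := backSkip tokens lo1 hi
        let hi2 := if lo1 < hi1 then hi1 - 1 else hi1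
        loopBGo fuel tokens m lo1 hi2
      else
        loopBGo fuel tokens m lo1 hi
    else (lo, hi)

def truncate_sequence_py_alt (tokens : List String) (max_tokens : Int) : List String :=
  let p := loopBGo tokens.length tokens max_tokens 0 (tokens.length : Int)
  PySem.List.slice tokens (some p.1) (some p.2)

-- ===== PRECONDITION & SPEC =====
-- Pre_ excludes max_tokens < 0, on which Python A always eventually calls pop(0) on an
-- empty list and raises IndexError (B returns [] there).
def Pre_truncate_sequence_py (tokens : List String) (max_tokens : Int) : Prop := 0 ≤ max_tokens
instance (tokens : List String) (max_tokens : Int) : Decidable (Pre_truncate_sequence_py tokens max_tokens) := by unfold Pre_truncate_sequence_py; infer_instance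
def pvWitness_truncate_sequence_py : List String × Int := (["a", "##b", "c"], 2)

def Spec_truncate_sequence_py (tokens : List String) (max_tokens : Int) (out : List String) : Prop := out = truncate_sequence_py_alt tokens max_tokens
instance (tokens : List String) (max_tokens : Int) (out : List String) : Decidable (Spec_truncate_sequence_py tokens max_tokens out) := by unfold Spec_truncate_sequence_py; infer_instance

-- ===== CLAIM (what is proved, stated in full; the proofs are below) =====
def Claim_equal_truncate_sequence_py : Prop := ∀ (tokens : List String) (max_tokens : Int), Dom_truncate_sequence_py tokens max_tokens → Pre_truncate_sequence_py tokens max_tokens → Spec_truncate_sequence_py tokens max_tokens (truncate_sequence_py tokens max_tokens)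

-- ===== LEMMAS AND PROOFS =====

-- `sl a b tokens` is the sub-slice tokens[a:b] the A-side list equals at cut indices (a, b)
def sl (a b : Nat) (tokens : List String) : List String := (tokens.drop a).take (b - a)

theorem sl_length {a b : Nat} (tokens : List String) (hab : a ≤ b) (hb : b ≤ tokens.length) :
    (sl a b tokens).length = b - a := by
  simp [sl]; omega

theorem sl_cons {a b : Nat} (tokens : List String) (hab : a < b) (hb : b ≤ tokens.length)
    (ha : a < tokens.length) :
    sl a b tokens = tokens[a] :: sl (a + 1) b tokens := by
  simp only [sl]
  rw [List.drop_eq_getElem_cons ha]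
  have : b - a = (b - (a + 1)) + 1 := by omega
  rw [this, List.take_succ_cons]

theorem sl_getLast {a b : Nat} (tokens : List String) (hab : a < b) (hb : b ≤ tokens.length) :
    (sl a b tokens).getLast? = some (tokens[b - 1]'(by omega)) := by
  have hlen : (sl a b tokens).length = b - a := sl_length tokens (by omega) hb
  rw [List.getLast?_eq_getElem?, hlen]
  simp only [sl]
  rw [List.getElem?_take_of_lt (by omega : b - a - 1 < b - a), List.getElem?_drop]
  have hidx : a + (b - a - 1) = b - 1 := by omega
  rw [hidx, List.getElem?_eq_getElem (by omega : b - 1 < tokens.length)]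

theorem sl_dropLast {a b : Nat} (tokens : List String) (hab : a ≤ b) (hb : b ≤ tokens.length) :
    (sl a b tokens).dropLast = sl a (b - 1) tokens := by
  simp only [sl, List.dropLast_eq_take, List.length_take, List.take_take, List.length_drop]
  congr 1
  omega

theorem sl_empty {a b : Nat} (tokens : List String) (h : b ≤ a) : sl a b tokens = [] := by
  simp [sl]; omega

-- front correspondence: popping leading "##" tokens of tokens[a:b] = advancing the front index
theorem front_corr (tokens : List String) :
    ∀ f a b : Nat, b - a ≤ f → a ≤ b → b ≤ tokens.length →
    ∃ a' : Nat, a ≤ a' ∧ a' ≤ b ∧ frontSkipGo f tokens (a : Int) (b : Int) = (a' : Int) ∧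
      popHashFront (sl a b tokens) = sl a' b tokens := by
  intro f
  induction f with
  | zero =>
      intro a b hk hab hb
      have hba : b = a := by omega
      refine ⟨a, le_refl a, by omega, rfl, ?_⟩
      rw [sl_empty tokens (by omega)]; simp [popHashFront, hba]
  | succ f ih =>
      intro a b hk hab hb
      by_cases hlt : a < b
      · have ha : a < tokens.length := by omega
        have hcons := sl_cons tokens hlt hb ha
        have hget : (PySem.List.pyGet? tokens (a : Int)).getD "" = tokens[a] := by
          simp [PySem.List.pyGet?_natCast, List.getElem?_eq_getElem ha]
        by_cases hs : PySem.Str.startswith tokens[a] "##"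
        · obtain ⟨a', h1, h2, h3, h4⟩ := ih (a + 1) b (by omega) (by omega) hb
          refine ⟨a', by omega, h2, ?_, ?_⟩
          · show (if _ ∧ _ then _ else _) = _
            rw [if_pos ⟨by exact_mod_cast hlt, by rw [hget]; exact hs⟩]
            have hcast : (a : Int) + 1 = ((a + 1 : Nat) : Int) := by omega
            rw [hcast, h3]
          · rw [hcons]; simp only [popHashFront]; rw [if_pos hs]; exact h4
        · refine ⟨a, le_refl a, by omega, ?_, ?_⟩
          · show (if _ ∧ _ then _ else _) = _
            rw [if_neg]
            rintro ⟨-, hc⟩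
            rw [hget] at hc; exact hs hc
          · rw [hcons]; simp only [popHashFront]; rw [if_neg hs]
      · have hba : b = a := by omega
        refine ⟨a, le_refl a, by omega, ?_, ?_⟩
        · show (if _ ∧ _ then _ else _) = _
          rw [if_neg]
          rintro ⟨hc, -⟩
          exact absurd (by exact_mod_cast hc : a < b) hlt
        · rw [sl_empty tokens (by omega)]; simp [popHashFront, hba]

-- back correspondence: popping trailing "##" tokens of tokens[a:b] = retreating the back index
theorem back_corr (tokens : List String) :
    ∀ f g a b : Nat, b - a ≤ f → b - a ≤ g → a ≤ b → b ≤ tokens.length →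
    ∃ b' : Nat, a ≤ b' ∧ b' ≤ b ∧ backSkipGo f tokens (a : Int) (b : Int) = (b' : Int) ∧
      popHashBackGo g (sl a b tokens) = sl a b' tokens := by
  intro f
  induction f with
  | zero =>
      intro g a b hk hg hab hb
      have hba : b = a := by omega
      have he : sl a b tokens = [] := sl_empty tokens (by omega)
      refine ⟨b, by omega, le_refl b, rfl, ?_⟩
      rw [he]
      cases g with
      | zero => rfl
      | succ g => show (if _ ∧ _ then _ else _) = _; rw [if_neg (by simp)]
  | succ f ih =>
      intro g a b hk hg hab hb
      by_cases hlt : a < b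
      · obtain ⟨g, rfl⟩ : ∃ g' : Nat, g = g' + 1 := ⟨g - 1, by omega⟩
        have hlast := sl_getLast tokens hlt hb
        have hne : sl a b tokens ≠ [] := by
          intro h0
          have := sl_length tokens (by omega : a ≤ b) hb
          rw [h0] at this
          simp at this
          omega
        have hgetb : (PySem.List.pyGet? (sl a b tokens) (-1)).getD "" = tokens[b - 1]'(by omega) := by
          rw [PySem.List.pyGet?_neg_one, hlast]
          rfl
        have hget : (PySem.List.pyGet? tokens ((b : Int) - 1)).getD "" = tokens[b - 1]'(by omega) := by
          have hcast : (b : Int) - 1 = ((b - 1 : Nat) : Int) := by omega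
          rw [hcast]
          simp [PySem.List.pyGet?_natCast, List.getElem?_eq_getElem (by omega : b - 1 < tokens.length)]
        by_cases hs : PySem.Str.startswith (tokens[b - 1]'(by omega)) "##"
        · obtain ⟨b', h1, h2, h3, h4⟩ := ih g a (b - 1) (by omega) (by omega) (by omega) (by omega)
          refine ⟨b', h1, by omega, ?_, ?_⟩
          · show (if _ ∧ _ then _ else _) = _
            rw [if_pos ⟨by exact_mod_cast hlt, by rw [hget]; exact hs⟩]
            have hcast : (b : Int) - 1 = ((b - 1 : Nat) : Int) := by omega
            rw [hcast, h3]
          · show (if _ ∧ _ then _ else _) = _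
            rw [if_pos ⟨hne, by rw [hgetb]; exact hs⟩]
            rw [sl_dropLast tokens (by omega) (by omega)]
            exact h4
        · refine ⟨b, by omega, le_refl b, ?_, ?_⟩
          · show (if _ ∧ _ then _ else _) = _
            rw [if_neg]
            rintro ⟨-, hc⟩
            rw [hget] at hc; exact hs hc
          · show (if _ ∧ _ then _ else _) = _
            rw [if_neg]
            rintro ⟨-, hc⟩
            rw [hgetb] at hc; exact hs hc
      · have hba : b = a := by omega
        have he : sl a b tokens = [] := sl_empty tokens (by omega)
        refine ⟨b, by omega, le_refl b, ?_, ?_⟩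
        · show (if _ ∧ _ then _ else _) = _
          rw [if_neg]
          rintro ⟨hc, -⟩
          exact absurd (by exact_mod_cast hc : a < b) hlt
        · rw [he]
          cases g with
          | zero => rfl
          | succ g => show (if _ ∧ _ then _ else _) = _; rw [if_neg (by simp)]

theorem loopAGo_nil (g : Nat) (m : Int) : loopAGo g [] m = [] := by
  cases g with
  | zero => rfl
  | succ g =>
      show (if _ then _ else _) = _
      split
      · rfl
      · rfl

-- unfolding helpers for the Skip wrappers at Nat-cast bounds
theorem frontSkip_eq (tokens : List String) (a b : Nat) :
    frontSkip tokens (a : Int) (b : Int) = frontSkipGo (b - a) tokens (a : Int) (b : Int) := by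
  unfold frontSkip
  congr 1
  omega

theorem backSkip_eq (tokens : List String) (a b : Nat) :
    backSkip tokens (a : Int) (b : Int) = backSkipGo (b - a) tokens (a : Int) (b : Int) := by
  unfold backSkip
  congr 1
  omega

-- one unfolding step of the A loop at a nonempty list
theorem loopAGo_cons (g : Nat) (t : String) (rest : List String) (m : Int)
    (h : (((t :: rest).length : Nat) : Int) > m) :
    loopAGo (g + 1) (t :: rest) m =
      loopAGo g (if ((popHashFront rest).length : Int) > m then
               (if (popHashBack (popHashFront rest)).isEmpty then popHashBack (popHashFront rest)
                else (popHashBack (popHashFront rest)).dropLast)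
             else popHashFront rest) m := by
  show (if _ then _ else _) = _
  rw [if_pos h]

-- main loop correspondence
theorem loop_corr (tokens : List String) (m : Int) :
    ∀ f g a b : Nat, b - a ≤ f → b - a ≤ g → a ≤ b → b ≤ tokens.length →
    ∃ a' b' : Nat, a' ≤ b' ∧ b' ≤ tokens.length ∧
      loopBGo f tokens m (a : Int) (b : Int) = ((a' : Int), (b' : Int)) ∧
      loopAGo g (sl a b tokens) m = sl a' b' tokens := by
  intro f
  induction f with
  | zero =>
      intro g a b hk hg hab hb
      have hba : b = a := by omega
      refine ⟨a, a, le_refl a, by omega, by rw [hba]; rfl, ?_⟩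
      rw [hba, sl_empty tokens (le_refl a), loopAGo_nil]
  | succ f ih =>
      intro g a b hk hg hab hb
      have hlen : (sl a b tokens).length = b - a := sl_length tokens hab hb
      by_cases hcond : (b : Int) - (a : Int) > m ∧ (a : Int) < (b : Int)
      · have hlt : a < b := by exact_mod_cast hcond.2
        obtain ⟨g, rfl⟩ : ∃ g' : Nat, g = g' + 1 := ⟨g - 1, by omega⟩
        have hAcond : ((sl a b tokens).length : Int) > m := by
          rw [hlen]; omega
        have ha : a < tokens.length := by omega
        have hcons := sl_cons tokens hlt hb ha
        obtain ⟨a1, hf1, hf2, hf3, hf4⟩ :=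
          front_corr tokens (b - (a + 1)) (a + 1) b (le_refl _) (by omega) hb
        have hfront : frontSkip tokens ((a : Int) + 1) (b : Int) = (a1 : Int) := by
          have hcast : (a : Int) + 1 = ((a + 1 : Nat) : Int) := by omega
          rw [hcast, frontSkip_eq, hf3]
        have hA2 : ((tokens[a] :: sl (a + 1) b tokens).length : Int) > m := by
          rw [← hcons]; exact hAcond
        have hts1len : (sl a1 b tokens).length = b - a1 := sl_length tokens hf2 hb
        by_cases hc2 : (b : Int) - (a1 : Int) > m
        · obtain ⟨b1, hb1, hb2, hb3, hb4⟩ :=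
            back_corr tokens (b - a1) (b - a1) a1 b (le_refl _) (le_refl _) hf2 hb
          have hback : backSkip tokens (a1 : Int) (b : Int) = (b1 : Int) := by
            rw [backSkip_eq, hb3]
          have hAc2 : ((sl a1 b tokens).length : Int) > m := by rw [hts1len]; omega
          have hpb : popHashBack (sl a1 b tokens) = sl a1 b1 tokens := by
            unfold popHashBack
            rw [hts1len]
            exact hb4
          by_cases hne : a1 < b1
          · obtain ⟨a', b', g1, g2, g3, g4⟩ := ih g a1 (b1 - 1) (by omega) (by omega) (by omega) (by omega)
            refine ⟨a', b', g1, g2, ?_, ?_⟩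
            · show (if _ ∧ _ then _ else _) = _
              rw [if_pos hcond]
              simp only [hfront, if_pos hc2, hback,
                if_pos (by exact_mod_cast hne : (a1 : Int) < (b1 : Int))]
              have hcast : (b1 : Int) - 1 = ((b1 - 1 : Nat) : Int) := by omega
              rw [hcast]
              exact g3
            · rw [hcons, loopAGo_cons g _ _ m hA2, hf4, if_pos hAc2]
              simp only [hpb]
              have hne' : ¬ (sl a1 b1 tokens).isEmpty := by
                rw [List.isEmpty_iff_length_eq_zero, sl_length tokens (by omega) (by omega)]
                omega
              rw [if_neg hne', sl_dropLast tokens (by omega) (by omega)]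
              exact g4
          · have hba1 : b1 = a1 := by omega
            obtain ⟨a', b', g1, g2, g3, g4⟩ := ih g a1 b1 (by omega) (by omega) (by omega) (by omega)
            refine ⟨a', b', g1, g2, ?_, ?_⟩
            · show (if _ ∧ _ then _ else _) = _
              rw [if_pos hcond]
              simp only [hfront, if_pos hc2, hback,
                if_neg (by exact_mod_cast hne : ¬ (a1 : Int) < (b1 : Int))]
              exact g3
            · rw [hcons, loopAGo_cons g _ _ m hA2, hf4, if_pos hAc2]
              simp only [hpb]
              have hemp : (sl a1 b1 tokens).isEmpty := by
                rw [List.isEmpty_iff_length_eq_zero, sl_length tokens (by omega) (by omega)]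
                omega
              rw [if_pos hemp]
              exact g4
        · obtain ⟨a', b', g1, g2, g3, g4⟩ := ih g a1 b (by omega) (by omega) hf2 hb
          refine ⟨a', b', g1, g2, ?_, ?_⟩
          · show (if _ ∧ _ then _ else _) = _
            rw [if_pos hcond]
            simp only [hfront, if_neg hc2]
            exact g3
          · have hAc2 : ¬ ((sl a1 b tokens).length : Int) > m := by rw [hts1len]; omega
            rw [hcons, loopAGo_cons g _ _ m hA2, hf4, if_neg hAc2]
            exact g4
      · refine ⟨a, b, hab, hb, ?_, ?_⟩
        · show (if _ ∧ _ then _ else _) = _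
          rw [if_neg hcond]
        · cases g with
          | zero => rfl
          | succ g =>
              by_cases hgt : ((sl a b tokens).length : Int) > m
              · have hba : a = b := by
                  rw [hlen] at hgt
                  omega
                have he : sl a b tokens = [] := sl_empty tokens (by omega)
                rw [he, loopAGo_nil]
              · show (if _ then _ else _) = _
                rw [if_neg hgt]

theorem final_slice (tokens : List String) {a b : Nat} (hab : a ≤ b) (hb : b ≤ tokens.length) :
    PySem.List.slice tokens (some (a : Int)) (some (b : Int)) = sl a b tokens := by
  rw [PySem.List.slice_natCast]
  rfl

-- ===== VERDICT (by name: the statement is the Claim_ definition above) =====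
theorem truncate_sequence_py_spec : Claim_equal_truncate_sequence_py := by
  intro tokens max_tokens _ _
  unfold Spec_truncate_sequence_py truncate_sequence_py truncate_sequence_py_alt
  obtain ⟨a', b', h1, h2, h3, h4⟩ :=
    loop_corr tokens max_tokens tokens.length tokens.length 0 tokens.length
      (by omega) (by omega) (by omega) (le_refl _)
  have h0 : sl 0 tokens.length tokens = tokens := by simp [sl]
  rw [h0] at h4
  simp only [Nat.cast_zero] at h3
  rw [h3, h4]
  exact (final_slice tokens h1 h2).symm
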